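-- pv_equiv track=rewrite | github.com/hjoo830/Algorithms | 프로그래머스/2/42586. 기능개발/기능개발.py | solution
-- ===== SOURCE A (Python) =====
-- def solution(progresses, speeds):
--     answer = []
--     period=[]
--     for i in range(len(progresses)):
--         day=1
--         while (progresses[i]+speeds[i]<100):
--             day+=1
--             progresses[i]+=speeds[i]
--         period.append(day)
--
--     i=0
--     k=1
--     while i<len(period):
--         cnt=1
--         while (i+k<len(period) and period[i]>=period[i+k]):
--             cnt+=1
--             k+=1
--         answer.append(cnt)
--         i+=k
--         k=1
--     return answer
-- ===== SOURCE B (Python) =====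
-- def solution(progresses, speeds):
--     answer = []
--     lead = None
--     for p, s in zip(progresses, speeds):
--         d = max(1, -((p - 100) // s))
--         if lead is not None and d <= lead:
--             answer[-1] += 1
--         else:
--             answer.append(1)
--             lead = d
--     return answer
-- ===== Notes on version B (the rewrite author's own statement) =====
-- stated objective: simpler
-- what changed: B replaces A's per-task simulation while-loop by the closed-form ceiling day max(1, -((p-100)//s)) and replaces A's two-index nested grouping pass by a single forward fold that increments the last group or opens a new one; B also does not mutate progresses.
-- outside the precondition, e.g. on solution([150], [0]): A returns [1], B raises ZeroDivisionError; on solution([200, 98], [-50, 1]): A returns [1, 1], B returns [2]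
import Mathlib
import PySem

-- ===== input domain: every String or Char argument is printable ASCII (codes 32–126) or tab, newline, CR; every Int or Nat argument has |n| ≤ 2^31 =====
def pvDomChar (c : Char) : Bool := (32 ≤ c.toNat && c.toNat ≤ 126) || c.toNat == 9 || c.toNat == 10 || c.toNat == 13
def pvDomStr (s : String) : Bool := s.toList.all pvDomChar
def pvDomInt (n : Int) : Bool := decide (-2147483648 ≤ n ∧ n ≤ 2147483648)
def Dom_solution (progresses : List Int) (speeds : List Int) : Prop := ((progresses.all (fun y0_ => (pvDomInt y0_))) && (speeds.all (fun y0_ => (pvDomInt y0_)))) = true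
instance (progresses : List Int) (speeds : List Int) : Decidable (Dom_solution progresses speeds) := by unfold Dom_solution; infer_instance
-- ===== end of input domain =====

-- B replaces A's per-task while-loop simulation by a closed-form ceiling division and A's
-- two-index nested grouping pass by one forward fold (objective: simpler). A mutates the
-- `progresses` argument in place; B does not — the equivalence proved here is about the
-- RETURN value only.

set_option maxRecDepth 8000

-- ===== PORT A =====
-- inner while loop of A's first pass; fuel (100 - p).toNat bounds the iteration count
-- whenever the speed is positive (Pre_), making the loop total
def dayLoop : Nat → Int → Int → Int → Int
  | 0, _p, _s, day => day
  | fuel+1, p, s, day => if p + s < 100 then dayLoop fuel (p + s) s (day + 1) else day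

-- inner while loop of A's second pass: returns the final (cnt, k); fuel = period.length
def innerLoop : Nat → List Int → Int → Int → Int → Int × Int
  | 0, _, _, k, cnt => (cnt, k)
  | fuel+1, period, i, k, cnt =>
    if i + k < (period.length : Int) ∧
        PySem.List.pyGetD period (i + k) 0 ≤ PySem.List.pyGetD period i 0 then
      innerLoop fuel period i (k + 1) (cnt + 1)
    else (cnt, k)

-- outer while loop of A's second pass; fuel = period.length (i grows by k ≥ 1 each round)
def outerLoop : Nat → List Int → Int → List Int → List Int
  | 0, _, _, answer => answer
  | fuel+1, period, i, answer =>
    if i < (period.length : Int) then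
      let r := innerLoop period.length period i 1 1
      outerLoop fuel period (i + r.2) (answer ++ [r.1])
    else answer

def solution (progresses : List Int) (speeds : List Int) : List Int :=
  let period := (PySem.List.pyRange 0 (progresses.length : Int) 1).foldl
    (fun per i =>
      match PySem.List.pyGet? progresses i, PySem.List.pyGet? speeds i with
      | some p, some s => per ++ [dayLoop (100 - p).toNat p s 1]
      | _, _ => per) []
  outerLoop period.length period 0 []

-- ===== PORT B =====
-- answer[-1] += 1
def incLast : List Int → List Int
  | [] => []
  | [x] => [x + 1]
  | x :: y :: xs => x :: incLast (y :: xs)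

-- one step of B's loop body, on the completion day d
def gstep (acc : List Int × Option Int) (d : Int) : List Int × Option Int :=
  match acc.2 with
  | some lead => if d ≤ lead then (incLast acc.1, acc.2) else (acc.1 ++ [1], some d)
  | none => (acc.1 ++ [1], some d)

def solution_alt (progresses : List Int) (speeds : List Int) : List Int :=
  ((progresses.zip speeds).foldl
    (fun acc ps => gstep acc (max 1 (-(PySem.Int.floordiv (ps.1 - 100) ps.2))))
    ([], none)).1

-- ===== PRECONDITION & SPEC =====
-- Pre_ excludes inputs where speeds is shorter than progresses (A raises IndexError) and
-- inputs where some used speed is ≤ 0: there A loops forever whenever progress+speed < 100,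
-- and where progress+speed ≥ 100 A's day=1 for a nonpositive speed is an accident of its
-- check-before-increment loop that the closed-form day (and B) does not reproduce.
def Pre_solution (progresses : List Int) (speeds : List Int) : Prop :=
  progresses.length ≤ speeds.length ∧
  ∀ s ∈ speeds.take progresses.length, 1 ≤ s
instance (progresses : List Int) (speeds : List Int) : Decidable (Pre_solution progresses speeds) := by unfold Pre_solution; infer_instance
def pvWitness_solution : List Int × List Int := ([93, 30, 55, 60, 40, 95], [1, 30, 5, 10, 60, 1])

def Spec_solution (progresses : List Int) (speeds : List Int) (out : List Int) : Prop := out = solution_alt progresses speeds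
instance (progresses : List Int) (speeds : List Int) (out : List Int) : Decidable (Spec_solution progresses speeds out) := by unfold Spec_solution; infer_instance

-- ===== CLAIM (what is proved, stated in full; the proofs are below) =====
def Claim_equal_solution : Prop := ∀ (progresses : List Int) (speeds : List Int), Dom_solution progresses speeds → Pre_solution progresses speeds → Spec_solution progresses speeds (solution progresses speeds)

-- ===== LEMMAS AND PROOFS =====

-- the grouping common to both passes: group sizes of maximal runs dominated by their leader
def groups : List Int → List Int
  | [] => []
  | d :: t =>
    ((1 : Int) + (t.takeWhile (fun x => x ≤ d)).length) ::
      groups (t.drop (t.takeWhile (fun x => x ≤ d)).length)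
termination_by l => l.length
decreasing_by
  simp only [List.length_cons, List.length_drop]
  omega

-- closed-form day: A's dayLoop equals B's max 1 ⌈(100-p)/s⌉, for positive s and enough fuel
theorem dayLoop_eq (s : Int) (hs : 0 < s) :
    ∀ (fuel : Nat) (p day : Int), (100 - p).toNat ≤ fuel →
      dayLoop fuel p s day = day - 1 + max 1 (-(PySem.Int.floordiv (p - 100) s)) := by
  intro fuel
  induction fuel with
  | zero =>
    intro p day hf
    have ha : 100 - p ≤ 0 := by omega
    set D : Int := -(PySem.Int.floordiv (p - 100) s) with hDdef
    have hDb : (D - 1) * s < 100 - p ∧ 100 - p ≤ D * s := by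
      have h1 : p - 100 = -(100 - p) := by ring
      exact (PySem.Int.neg_floordiv_neg_eq_iff_of_pos hs).mp (by rw [hDdef, h1])
    have hD1 : D ≤ 1 := by nlinarith [hDb.1]
    have hmax : max 1 D = 1 := by omega
    simp only [dayLoop, hmax]
    omega
  | succ f ih =>
    intro p day hf
    by_cases hlt : p + s < 100
    · have ha : s < 100 - p := by omega
      have ha' : (1:Int) ≤ s := hs
      set D : Int := -(PySem.Int.floordiv (p - 100) s) with hDdef
      have hDb : (D - 1) * s < 100 - p ∧ 100 - p ≤ D * s := by
        have h1 : p - 100 = -(100 - p) := by ring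
        exact (PySem.Int.neg_floordiv_neg_eq_iff_of_pos hs).mp (by rw [hDdef, h1])
      have hD2 : 2 ≤ D := by nlinarith [hDb.1, hDb.2]
      have hD' : -(PySem.Int.floordiv (p + s - 100) s) = D - 1 := by
        have h1 : p + s - 100 = -(100 - p - s) := by ring
        rw [h1]
        exact (PySem.Int.neg_floordiv_neg_eq_iff_of_pos hs).mpr
          ⟨by nlinarith [hDb.1, hDb.2], by nlinarith [hDb.1, hDb.2]⟩
      have hfuel : (100 - (p + s)).toNat ≤ f := by omega
      have := ih (p + s) (day + 1) hfuel
      simp only [dayLoop, if_pos hlt, this, hD']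
      have hmax1 : max 1 D = D := by omega
      have hmax2 : max 1 (D - 1) = D - 1 := by omega
      omega
    · simp only [dayLoop, if_neg hlt]
      have hps : 100 - p ≤ s := by omega
      set D : Int := -(PySem.Int.floordiv (p - 100) s) with hDdef
      have hDb : (D - 1) * s < 100 - p ∧ 100 - p ≤ D * s := by
        have h1 : p - 100 = -(100 - p) := by ring
        exact (PySem.Int.neg_floordiv_neg_eq_iff_of_pos hs).mp (by rw [hDdef, h1])
      have hD1 : D ≤ 1 := by nlinarith [hDb.1]
      have : max 1 D = 1 := by omega
      omega

-- incLast on a list with a known last element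
theorem incLast_append (ans : List Int) (c : Int) :
    incLast (ans ++ [c]) = ans ++ [c + 1] := by
  induction ans with
  | nil => simp [incLast]
  | cons x xs ih =>
    cases xs with
    | nil => simp [incLast]
    | cons y ys => simpa [incLast] using ih

-- B's fold, started inside a group with current count c and leader `lead`
theorem foldl_gstep_eq (ds : List Int) :
    ∀ (ans : List Int) (c lead : Int),
      ((ds.foldl gstep (ans ++ [c], some lead)).1 =
        ans ++ (c + ((ds.takeWhile (fun x => x ≤ lead)).length : Int)) ::
          groups (ds.drop (ds.takeWhile (fun x => x ≤ lead)).length)) := by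
  induction ds with
  | nil => intro ans c lead; simp [groups]
  | cons d t ih =>
    intro ans c lead
    by_cases hd : d ≤ lead
    · have hg : gstep (ans ++ [c], some lead) d = (ans ++ [c + 1], some lead) := by
        simp [gstep, hd, incLast_append]
      have hTW : (d :: t).takeWhile (fun x => decide (x ≤ lead)) =
          d :: t.takeWhile (fun x => decide (x ≤ lead)) := by
        simp [hd]
      simp only [List.foldl_cons, hg, ih, hTW, List.length_cons, List.drop_succ_cons]
      congr 2
      push_cast
      ring
    · have : gstep (ans ++ [c], some lead) d = ((ans ++ [c]) ++ [1], some d) := by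
        simp [gstep, hd]
      simp only [List.foldl_cons, this, ih]
      simp [hd, groups]
  
-- B's whole fold computes `groups`
theorem foldl_gstep_groups (ds : List Int) :
    ((ds.foldl gstep ([], none)).1 = groups ds) := by
  cases ds with
  | nil => simp [groups]
  | cons d t =>
    have h0 : gstep (([] : List Int), (none : Option Int)) d = ([1], some d) := by
      simp [gstep]
    have := foldl_gstep_eq t [] 1 d
    simp only [List.foldl_cons, h0]
    simpa [groups] using this

-- A's inner while loop counts the dominated run starting at index i+k
theorem innerLoop_eq (period : List Int) (d : Int) :
    ∀ (fuel : Nat) (i j : Nat) (k cnt : Int),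
      k = (j : Int) + 1 → i + 1 + j ≤ period.length →
      period.length - (i + 1 + j) ≤ fuel →
      PySem.List.pyGetD period (i : Int) 0 = d →
      innerLoop fuel period (i : Int) k cnt =
        (cnt + (((period.drop (i + 1 + j)).takeWhile (fun x => x ≤ d)).length : Int),
         k + (((period.drop (i + 1 + j)).takeWhile (fun x => x ≤ d)).length : Int)) := by
  intro fuel
  induction fuel with
  | zero =>
    intro i j k cnt hk hle hfuel _hd
    have hdrop : period.drop (i + 1 + j) = [] := List.drop_eq_nil_of_le (by omega)
    simp [innerLoop, hdrop]
  | succ f ih =>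
    intro i j k cnt hk hle hfuel hd
    by_cases hend : i + 1 + j = period.length
    · have hdrop : period.drop (i + 1 + j) = [] := List.drop_eq_nil_of_le (by omega)
      have hcond : ¬ ((i : Int) + k < (period.length : Int) ∧
          PySem.List.pyGetD period ((i : Int) + k) 0 ≤ PySem.List.pyGetD period (i : Int) 0) := by
        intro h
        have := h.1
        omega
      simp only [innerLoop, if_neg hcond]
      simp [hdrop]
    · have hlt : i + 1 + j < period.length := by omega
      have hik : (i : Int) + k = ((i + 1 + j : Nat) : Int) := by push_cast [hk]; ring
      have hget : PySem.List.pyGetD period ((i : Int) + k) 0 = period[i + 1 + j] := by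
        rw [hik, PySem.List.pyGetD_natCast]
        exact List.getD_eq_getElem _ _ hlt
      have hdropc : period.drop (i + 1 + j) = period[i + 1 + j] :: period.drop (i + 1 + j + 1) :=
        List.drop_eq_getElem_cons hlt
      by_cases hcmp : period[i + 1 + j] ≤ d
      · have hcond : ((i : Int) + k < (period.length : Int) ∧
            PySem.List.pyGetD period ((i : Int) + k) 0 ≤ PySem.List.pyGetD period (i : Int) 0) := by
          refine ⟨by omega, ?_⟩
          rw [hget, hd]; exact hcmp
        have hrec := ih i (j + 1) (k + 1) (cnt + 1) (by omega) (by omega) (by omega) hd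
        have harith : i + 1 + (j + 1) = i + 1 + j + 1 := by omega
        have hTW : (period.drop (i + 1 + j)).takeWhile (fun x => decide (x ≤ d)) =
            period[i + 1 + j] :: (period.drop (i + 1 + j + 1)).takeWhile (fun x => decide (x ≤ d)) := by
          rw [hdropc, List.takeWhile_cons]
          simp [hcmp]
        simp only [innerLoop, if_pos hcond, hrec, harith, hTW, List.length_cons,
          Prod.mk.injEq]
        constructor <;> (push_cast; ring)
      · have hcond : ¬ ((i : Int) + k < (period.length : Int) ∧
            PySem.List.pyGetD period ((i : Int) + k) 0 ≤ PySem.List.pyGetD period (i : Int) 0) := by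
          intro h
          exact hcmp (by rw [← hget, ← hd]; exact h.2)
        have hTW : (period.drop (i + 1 + j)).takeWhile (fun x => decide (x ≤ d)) = [] := by
          rw [hdropc, List.takeWhile_cons]
          simp [hcmp]
        simp only [innerLoop, if_neg hcond, hTW]
        simp

-- A's outer loop computes `groups` of the suffix
theorem outerLoop_eq (period : List Int) :
    ∀ (fuel : Nat) (i : Nat) (ans : List Int),
      period.length - i ≤ fuel →
      outerLoop fuel period (i : Int) ans = ans ++ groups (period.drop i) := by
  intro fuel
  induction fuel with
  | zero =>
    intro i ans hfuel
    have hdrop : period.drop i = [] := List.drop_eq_nil_of_le (by omega)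
    have hcond : ¬ ((i : Int) < (period.length : Int)) := by omega
    simp [outerLoop, hdrop, groups]
  | succ f ih =>
    intro i ans hfuel
    by_cases hlt : i < period.length
    · have hcond : (i : Int) < (period.length : Int) := by omega
      have hd : PySem.List.pyGetD period (i : Int) 0 = period[i] := by
        rw [PySem.List.pyGetD_natCast]
        exact List.getD_eq_getElem _ _ hlt
      have hinner := innerLoop_eq period (period[i]) period.length i 0 1 1
        (by omega) (by omega) (by omega) hd
      set w : Nat := ((period.drop (i + 1 + 0)).takeWhile (fun x => x ≤ period[i])).length
        with hw
      have hcast : (i : Int) + (1 + (w : Int)) = ((i + 1 + w : Nat) : Int) := by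
        push_cast; ring
      have hrec := ih (i + 1 + w) (ans ++ [1 + (w : Int)]) (by omega)
      have hdropc : period.drop i = period[i] :: period.drop (i + 1) :=
        List.drop_eq_getElem_cons hlt
      have hgroups : groups (period.drop i) =
          ((1 : Int) + (w : Int)) :: groups (period.drop (i + 1 + w)) := by
        rw [hdropc, groups]
        have h1 : ((period.drop (i + 1)).takeWhile (fun x => x ≤ period[i])).length = w := by
          simp [hw]
        rw [h1]
        have h2 : (period.drop (i + 1)).drop w = period.drop (i + 1 + w) := by
          rw [List.drop_drop]
        rw [h2]
      simp only [outerLoop, if_pos hcond, hinner, hcast, hrec, hgroups]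
      simp
    · have hcond : ¬ ((i : Int) < (period.length : Int)) := by omega
      have hdrop : period.drop i = [] := List.drop_eq_nil_of_le (by omega)
      simp [outerLoop, hcond, hdrop, groups]

-- A's first pass builds the per-index day list as a map over the zip
theorem periodFold_eq (progresses speeds : List Int) :
    ∀ (n : Nat), n ≤ progresses.length → n ≤ speeds.length →
      (PySem.List.pyRange 0 (n : Int) 1).foldl
        (fun per i =>
          match PySem.List.pyGet? progresses i, PySem.List.pyGet? speeds i with
          | some p, some s => per ++ [dayLoop (100 - p).toNat p s 1]
          | _, _ => per) [] =
      ((progresses.take n).zip (speeds.take n)).map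
        (fun ps => dayLoop (100 - ps.1).toNat ps.1 ps.2 1) := by
  intro n
  induction n with
  | zero =>
    intro _ _
    simp [PySem.List.pyRange]
  | succ m ih =>
    intro hp hs
    have hp' : m < progresses.length := by omega
    have hs' : m < speeds.length := by omega
    have hrange : PySem.List.pyRange 0 ((m + 1 : Nat) : Int) 1 =
        PySem.List.pyRange 0 (m : Nat) 1 ++ [(m : Int)] := by
      have : ((m + 1 : Nat) : Int) = (m : Int) + 1 := by push_cast; ring
      rw [this, PySem.List.pyRange_one_succ_right (by positivity)]
    rw [hrange, List.foldl_append, ih (by omega) (by omega)]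
    have hgp : PySem.List.pyGet? progresses (m : Int) = some progresses[m] := by
      rw [PySem.List.pyGet?_natCast]
      exact List.getElem?_eq_getElem hp'
    have hgs : PySem.List.pyGet? speeds (m : Int) = some speeds[m] := by
      rw [PySem.List.pyGet?_natCast]
      exact List.getElem?_eq_getElem hs'
    have htp : progresses.take (m + 1) = progresses.take m ++ [progresses[m]] := by
      rw [List.take_add_one]
      simp [List.getElem?_eq_getElem hp']
    have hts : speeds.take (m + 1) = speeds.take m ++ [speeds[m]] := by
      rw [List.take_add_one]
      simp [List.getElem?_eq_getElem hs']
    rw [htp, hts, List.zip_append (by simp; omega), List.map_append]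
    simp only [List.foldl_cons, List.foldl_nil, hgp, hgs]
    simp

-- zip only looks at the first `l.length` elements of the second list
theorem zip_take_self (l : List Int) : ∀ (l' : List Int), l.zip (l'.take l.length) = l.zip l' := by
  induction l with
  | nil => intro l'; simp
  | cons x xs ih =>
    intro l'
    cases l' with
    | nil => simp
    | cons y ys => simp [List.zip_cons_cons, ih ys]

-- ===== VERDICT (by name: the statement is the Claim_ definition above) =====
theorem solution_spec : Claim_equal_solution := by
  intro progresses speeds _hdom hpre
  obtain ⟨hlen, hsp⟩ := hpre
  show solution progresses speeds = solution_alt progresses speeds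
  simp only [solution, solution_alt]
  rw [periodFold_eq progresses speeds progresses.length le_rfl hlen]
  rw [List.take_length]
  have hmap : (progresses.zip (speeds.take progresses.length)).map
        (fun ps => dayLoop (100 - ps.1).toNat ps.1 ps.2 1) =
      (progresses.zip (speeds.take progresses.length)).map
        (fun ps => max 1 (-(PySem.Int.floordiv (ps.1 - 100) ps.2))) := by
    apply List.map_congr_left
    rintro ⟨p, s⟩ hmem
    have hs : 1 ≤ s := hsp s (List.of_mem_zip hmem).2
    have hday := dayLoop_eq s (by omega) ((100 - p).toNat) p 1 le_rfl
    simp only at hday ⊢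
    rw [hday]
    ring
  rw [hmap, zip_take_self]
  set days : List Int := (progresses.zip speeds).map
    (fun ps => max 1 (-(PySem.Int.floordiv (ps.1 - 100) ps.2))) with hdays
  have houter : outerLoop days.length days ((0 : Nat) : Int) [] = [] ++ groups (days.drop 0) :=
    outerLoop_eq days days.length 0 [] (by omega)
  simp only [Nat.cast_zero, List.drop_zero, List.nil_append] at houter
  rw [houter]
  have hfold : (progresses.zip speeds).foldl
      (fun acc ps => gstep acc (max 1 (-(PySem.Int.floordiv (ps.1 - 100) ps.2))))
      ([], none) = days.foldl gstep ([], none) := by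
    rw [hdays, List.foldl_map]
  rw [hfold, foldl_gstep_groups]
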